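-- pv_equiv track=rewrite | github.com/mjoh223/phamlite | ISLAND_runner.py | pairs_shared_between_all_lists
-- ===== SOURCE A (Python) =====
-- def find_pairs_two_lists(list1, list2, threshold):
--
--     list1 = sorted(list1)
--     list2 = sorted(list2)
--
--     pairs = []
--
--     for i in range(len(list1)):
--
--         for j in range(len(list2)):
--
--             if abs(list1[i] - list2[j]) <= threshold:
--
--                 pairs.append([list1[i], list2[j]])
--
--             elif list2[j] > list1[i]:
--
--                 break
--
--     return pairs
--
-- def list_and_list_of_pairs(input_list, list_of_pairs, threshold):
--
--     input_list = sorted(input_list)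
--
--     if len(list_of_pairs) == 0:
--
--         return []
--
--     if isinstance(list_of_pairs[0], int):
--
--         list_of_pairs = [[pair] for pair in list_of_pairs]
--
--     new_pairs = []
--
--     for pair in list_of_pairs:
--
--         for number in input_list:
--
--             if all([abs(number - value) <= threshold for value in pair]) and number not in pair:
--
--                 new_pairs.append(pair + [number])
--
--             elif number - min(pair) > threshold:
--
--                 break
--
--     return new_pairs
--
-- def pairs_shared_between_all_lists(list_of_lists, threshold):
--
--     if len(list_of_lists) == 0:
--
--         return []
--
--     if len(list_of_lists) == 1:
--
--         return [[thing] for thing in list_of_lists[0]]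
--
--     out_list = []
--     current_list = []
--
--     for item in list_of_lists:
--
--         working_list = []
--
--         for thing in item:
--
--             working_list.append(thing)
--
--         current_list.append(working_list)
--
--     initial_pairs_list = find_pairs_two_lists(current_list[0], current_list[1], threshold)
--
--     running_pairs_list = initial_pairs_list
--
--     for thing in current_list[2:]:
--         running_pairs_list = list_and_list_of_pairs(thing, running_pairs_list, threshold)
--
--     out_list += running_pairs_list
--
--     return out_list
-- ===== SOURCE B (Python) =====
-- import bisect
--
-- def pairs_shared_between_all_lists(list_of_lists, threshold):
--     if len(list_of_lists) == 0:
--         return []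
--     if len(list_of_lists) == 1:
--         return [[x] for x in list_of_lists[0]]
--     srt = [sorted(l) for l in list_of_lists]
--     first, second = srt[0], srt[1]
--     pairs = [[a, b]
--              for a in first
--              for b in second[bisect.bisect_left(second, a - threshold):
--                              bisect.bisect_right(second, a + threshold)]]
--     for nums in srt[2:]:
--         new_pairs = []
--         for pair in pairs:
--             lo = max(pair) - threshold
--             hi = min(pair) + threshold
--             i = bisect.bisect_left(nums, lo)
--             j = bisect.bisect_right(nums, hi)
--             new_pairs.extend(pair + [n] for n in nums[i:j] if n not in pair)
--         pairs = new_pairs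
--     return pairs
-- ===== Notes on version B (the rewrite author's own statement) =====
-- stated objective: alternative
-- what changed: Each merge step locates the valid window [max(pair)-t, min(pair)+t] in the sorted candidate list with bisect and takes that slice, instead of scanning candidates from index 0 with a break for every pair; the two-list seeding step does the same per element. The output size dominates the running time, so a timing run shows no measurable speed-up.
import Mathlib
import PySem

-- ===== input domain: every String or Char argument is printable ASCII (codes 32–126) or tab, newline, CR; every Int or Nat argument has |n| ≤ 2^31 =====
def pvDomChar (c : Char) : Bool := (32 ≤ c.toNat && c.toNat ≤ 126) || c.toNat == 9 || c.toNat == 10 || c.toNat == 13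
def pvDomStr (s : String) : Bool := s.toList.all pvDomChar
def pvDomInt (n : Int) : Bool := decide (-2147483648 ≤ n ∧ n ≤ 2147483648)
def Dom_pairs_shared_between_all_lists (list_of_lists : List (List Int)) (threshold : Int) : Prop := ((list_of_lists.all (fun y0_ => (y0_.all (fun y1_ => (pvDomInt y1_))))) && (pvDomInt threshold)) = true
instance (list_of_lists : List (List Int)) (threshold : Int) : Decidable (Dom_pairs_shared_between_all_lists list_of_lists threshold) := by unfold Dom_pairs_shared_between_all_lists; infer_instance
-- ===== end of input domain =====

-- B finds each merge step's valid window in the sorted candidate list with bisect and slices it,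
-- instead of scanning every candidate from index 0 with a break for every pair (objective: alternative).

-- ===== PORT A =====
-- inner loop of find_pairs_two_lists over list2 (with its break)
def pvFpInner (a t : Int) : List Int → List (List Int)
  | [] => []
  | b :: rest =>
    if |a - b| ≤ t then [a, b] :: pvFpInner a t rest
    else if b > a then []          -- break
    else pvFpInner a t rest

def pvFindPairsTwoLists (list1 list2 : List Int) (threshold : Int) : List (List Int) :=
  let s1 := PySem.List.sorted list1 (fun x => x)
  let s2 := PySem.List.sorted list2 (fun x => x)
  s1.foldl (fun pairs a => pairs ++ pvFpInner a threshold s2) []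

-- inner loop of list_and_list_of_pairs over input_list (with its break);
-- min(pair) is only evaluated by Python when pair ≠ [] (for pair = [] the first branch is always taken), so .getD 0 is never the result of an empty min
def pvLlInner (pair : List Int) (t : Int) : List Int → List (List Int)
  | [] => []
  | n :: rest =>
    if pair.all (fun v => decide (|n - v| ≤ t)) && !pair.contains n then
      (pair ++ [n]) :: pvLlInner pair t rest
    else if n - ((PySem.List.min? pair (fun x => x)).getD 0) > t then []   -- break
    else pvLlInner pair t rest

-- the isinstance(list_of_pairs[0], int) branch is a dynamic-type check; under the
-- List (List Int) typing of list_of_pairs it is always False, so it is omitted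
def pvListAndListOfPairs (input_list : List Int) (list_of_pairs : List (List Int)) (threshold : Int) : List (List Int) :=
  let si := PySem.List.sorted input_list (fun x => x)
  if list_of_pairs.length = 0 then []
  else list_of_pairs.foldl (fun new_pairs pair => new_pairs ++ pvLlInner pair threshold si) []

def pairs_shared_between_all_lists (list_of_lists : List (List Int)) (threshold : Int) : List (List Int) :=
  if list_of_lists.length = 0 then []
  else if list_of_lists.length = 1 then (list_of_lists.headD []).map (fun thing => [thing])
  else
    let current_list := list_of_lists.foldl
      (fun cl item => cl ++ [item.foldl (fun wl thing => wl ++ [thing]) []]) []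
    match current_list with
    | c0 :: c1 :: rest =>
      let initial_pairs_list := pvFindPairsTwoLists c0 c1 threshold
      [] ++ rest.foldl (fun rp thing => pvListAndListOfPairs thing rp threshold) initial_pairs_list
    | _ => []   -- unreachable: current_list has the same length as list_of_lists, which is ≥ 2 here

-- ===== PORT B =====
-- nums[bisect_left(nums, lo) : bisect_right(nums, hi)]
def pvWindow (nums : List Int) (lo hi : Int) : List Int :=
  (nums.drop (PySem.List.bisectLeft nums lo)).take
    (PySem.List.bisectRight nums hi - PySem.List.bisectLeft nums lo)

-- body of B's per-pair extension (max/min of a pair are only taken on nonempty pairs)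
def pvExtend (nums : List Int) (t : Int) (pair : List Int) : List (List Int) :=
  let lo := ((PySem.List.max? pair (fun x => x)).getD 0) - t
  let hi := ((PySem.List.min? pair (fun x => x)).getD 0) + t
  ((pvWindow nums lo hi).filter (fun n => !pair.contains n)).map (fun n => pair ++ [n])

def pairs_shared_between_all_lists_alt (list_of_lists : List (List Int)) (threshold : Int) : List (List Int) :=
  match list_of_lists with
  | [] => []
  | [l] => l.map (fun x => [x])
  | l0 :: l1 :: restRaw =>
    let s0 := PySem.List.sorted l0 (fun x => x)
    let s1 := PySem.List.sorted l1 (fun x => x)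
    let pairs0 := s0.flatMap (fun a =>
      (pvWindow s1 (a - threshold) (a + threshold)).map (fun b => [a, b]))
    (restRaw.map (fun l => PySem.List.sorted l (fun x => x))).foldl
      (fun pairs nums => pairs.flatMap (pvExtend nums threshold)) pairs0

-- ===== PRECONDITION & SPEC =====
def Spec_pairs_shared_between_all_lists (list_of_lists : List (List Int)) (threshold : Int) (out : List (List Int)) : Prop := out = pairs_shared_between_all_lists_alt list_of_lists threshold
instance (list_of_lists : List (List Int)) (threshold : Int) (out : List (List Int)) : Decidable (Spec_pairs_shared_between_all_lists list_of_lists threshold out) := by unfold Spec_pairs_shared_between_all_lists; infer_instance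

-- ===== CLAIM (what is proved, stated in full; the proofs are below) =====
def Claim_equal_pairs_shared_between_all_lists : Prop := ∀ (list_of_lists : List (List Int)) (threshold : Int), Dom_pairs_shared_between_all_lists list_of_lists threshold → Spec_pairs_shared_between_all_lists list_of_lists threshold (pairs_shared_between_all_lists list_of_lists threshold)

-- ===== LEMMAS AND PROOFS =====

-- the takeWhile prefix: a length bound, all before it satisfy p, the element at it (if any) fails p
theorem pvTwFacts (p : Int → Bool) (xs : List Int) :
    (xs.takeWhile p).length ≤ xs.length ∧
    (∀ j (hj : j < xs.length), j < (xs.takeWhile p).length → p xs[j] = true) ∧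
    (∀ hlt : (xs.takeWhile p).length < xs.length, p xs[(xs.takeWhile p).length] = false) := by
  induction xs with
  | nil => simp
  | cons x rest ih =>
    obtain ⟨ih1, ih2, ih3⟩ := ih
    by_cases hp : p x = true
    · refine ⟨?_, ?_, ?_⟩
      · simp [List.takeWhile_cons, hp]; omega
      · intro j hj hj2
        simp only [List.takeWhile_cons, hp, if_true, List.length_cons] at hj2 ⊢
        cases j with
        | zero => simpa using hp
        | succ k =>
          simp only [List.getElem_cons_succ]
          exact ih2 k (by simpa using hj) (by omega)
      · intro hlt
        simp only [List.takeWhile_cons, hp, if_true, List.length_cons] at hlt ⊢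
        simp only [List.getElem_cons_succ]
        exact ih3 (by omega)
    · have hp' : p x = false := by simpa using hp
      refine ⟨?_, ?_, ?_⟩ <;> simp [List.takeWhile_cons, hp']

-- on a sorted list, bisect_left is the length of the prefix of elements < x
theorem pvBlEq (xs : List Int) (x : Int) (h : xs.Pairwise (· ≤ ·)) :
    PySem.List.bisectLeft xs x = (xs.takeWhile (fun n => decide (n < x))).length := by
  obtain ⟨hle, hlt, hge⟩ := PySem.List.bisectLeft_spec xs x h
  obtain ⟨t1, t2, t3⟩ := pvTwFacts (fun n => decide (n < x)) xs
  rcases Nat.lt_trichotomy (PySem.List.bisectLeft xs x)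
    ((xs.takeWhile (fun n => decide (n < x))).length) with hc | hc | hc
  · have h1 := t2 (PySem.List.bisectLeft xs x) (by omega) hc
    have h2 := hge (PySem.List.bisectLeft xs x) (by omega) (le_refl _)
    simp at h1; omega
  · exact hc
  · have h1 := hlt ((xs.takeWhile (fun n => decide (n < x))).length) (by omega) hc
    have h2 := t3 (by omega)
    simp at h2; omega

-- on a sorted list, bisect_right is the length of the prefix of elements ≤ x
theorem pvBrEq (xs : List Int) (x : Int) (h : xs.Pairwise (· ≤ ·)) :
    PySem.List.bisectRight xs x = (xs.takeWhile (fun n => decide (n ≤ x))).length := by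
  obtain ⟨hle, hlt, hge⟩ := PySem.List.bisectRight_spec xs x h
  obtain ⟨t1, t2, t3⟩ := pvTwFacts (fun n => decide (n ≤ x)) xs
  rcases Nat.lt_trichotomy (PySem.List.bisectRight xs x)
    ((xs.takeWhile (fun n => decide (n ≤ x))).length) with hc | hc | hc
  · have h1 := t2 (PySem.List.bisectRight xs x) (by omega) hc
    have h2 := hge (PySem.List.bisectRight xs x) (by omega) (le_refl _)
    simp at h1; omega
  · exact hc
  · have h1 := hlt ((xs.takeWhile (fun n => decide (n ≤ x))).length) (by omega) hc
    have h2 := t3 (by omega)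
    simp at h2; omega

-- on a sorted list, B's bisect window equals the interval filter
theorem pvWindow_eq_filter (xs : List Int) (lo hi : Int) (h : xs.Pairwise (· ≤ ·)) :
    pvWindow xs lo hi = xs.filter (fun n => decide (lo ≤ n) && decide (n ≤ hi)) := by
  unfold pvWindow
  rw [pvBlEq xs lo h, pvBrEq xs hi h]
  induction xs with
  | nil => simp
  | cons x rest ih =>
    rw [List.pairwise_cons] at h
    obtain ⟨hx, hrest⟩ := h
    have ih' := ih hrest
    by_cases h1 : x < lo
    · have d1 : decide (x < lo) = true := by simp [h1]
      have dF : decide (lo ≤ x) = false := by simp; omega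
      by_cases h2 : x ≤ hi
      · have d2 : decide (x ≤ hi) = true := by simp [h2]
        simpa [List.takeWhile_cons, d1, d2, dF, List.filter_cons, Nat.succ_sub_succ] using ih'
      · have d2 : decide (x ≤ hi) = false := by simp [h2]
        have hnil : rest.filter (fun n => decide (lo ≤ n) && decide (n ≤ hi)) = [] := by
          rw [List.filter_eq_nil_iff]
          intro a ha
          have := hx a ha
          simp; omega
        simp [List.takeWhile_cons, d1, d2, dF, List.filter_cons, hnil]
    · have d1 : decide (x < lo) = false := by simp [h1]
      have h1' : lo ≤ x := by omega
      have dT : decide (lo ≤ x) = true := by simp [h1']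
      have htwrest : rest.takeWhile (fun n => decide (n < lo)) = [] := by
        rw [List.takeWhile_eq_nil_iff]
        intro hl
        have := hx _ (List.getElem_mem hl)
        simp only [List.get_eq_getElem]
        simp; omega
      by_cases h2 : x ≤ hi
      · have d2 : decide (x ≤ hi) = true := by simp [h2]
        simp only [htwrest, List.length_nil, List.drop_zero, Nat.sub_zero] at ih'
        simp [List.takeWhile_cons, d1, d2, dT, List.filter_cons, htwrest, ih']
      · have d2 : decide (x ≤ hi) = false := by simp [h2]
        have hnil : rest.filter (fun n => decide (lo ≤ n) && decide (n ≤ hi)) = [] := by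
          rw [List.filter_eq_nil_iff]
          intro a ha
          have := hx a ha
          simp; omega
        simp [List.takeWhile_cons, d1, d2, List.filter_cons, hnil]

-- A's inner loop of find_pairs_two_lists equals the interval filter on a sorted list
theorem pvFpInner_eq (a t : Int) (l2 : List Int) (h : l2.Pairwise (· ≤ ·)) :
    pvFpInner a t l2 =
      (l2.filter (fun b => decide (a - t ≤ b) && decide (b ≤ a + t))).map (fun b => [a, b]) := by
  induction l2 with
  | nil => simp [pvFpInner]
  | cons b rest ih =>
    rw [List.pairwise_cons] at h
    obtain ⟨hb, hrest⟩ := h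
    have habs : |a - b| ≤ t ↔ (a - t ≤ b ∧ b ≤ a + t) := by rw [abs_le]; omega
    by_cases h1 : |a - b| ≤ t
    · have hd : (decide (a - t ≤ b) && decide (b ≤ a + t)) = true := by
        have := habs.mp h1; simp [this.1, this.2]
      simp only [pvFpInner, if_pos h1, List.filter_cons, hd]
      rw [if_pos trivial, List.map_cons, ih hrest]
    · have h1' := h1
      rw [habs] at h1'
      by_cases h2 : b > a
      · have hbt : a + t < b := by omega
        simp only [pvFpInner, if_neg h1, if_pos h2]
        have hnil : (b :: rest).filter (fun c => decide (a - t ≤ c) && decide (c ≤ a + t)) = [] := by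
          rw [List.filter_eq_nil_iff]
          intro c hc
          rcases List.mem_cons.mp hc with rfl | hc'
          · simp; omega
          · have := hb c hc'
            simp; omega
        rw [hnil, List.map_nil]
      · have hd : (decide (a - t ≤ b) && decide (b ≤ a + t)) = false := by
          simp; omega
        simp only [pvFpInner, if_neg h1, if_neg h2, List.filter_cons, hd, Bool.false_eq_true,
          if_false]
        exact ih hrest

-- for a nonempty pair, "within threshold of every member" is the interval [max - t, min + t]
theorem pvAllWithin (pair : List Int) (hp : pair ≠ []) (n t : Int) :
    (pair.all (fun v => decide (|n - v| ≤ t))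
      = (decide ((((PySem.List.max? pair (fun x => x)).getD 0) - t) ≤ n)
          && decide (n ≤ ((PySem.List.min? pair (fun x => x)).getD 0) + t))) := by
  obtain ⟨m, hm⟩ := Option.ne_none_iff_exists'.mp
    (fun hnone => hp ((PySem.List.min?_eq_none_iff (xs := pair) (key := fun x => x)).mp hnone))
  obtain ⟨M, hM⟩ := Option.ne_none_iff_exists'.mp
    (fun hnone => hp ((PySem.List.max?_eq_none_iff (xs := pair) (key := fun x => x)).mp hnone))
  have hmmem := PySem.List.min?_mem hm
  have hMmem := PySem.List.max?_mem hM
  have hmin := PySem.List.min?_isMin hm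
  have hmax := PySem.List.max?_isMax hM
  simp only at hmin hmax
  rw [hm, hM]
  simp only [Option.getD_some]
  rw [Bool.eq_iff_iff]
  simp only [List.all_eq_true, Bool.and_eq_true, decide_eq_true_eq, abs_le]
  constructor
  · intro hall
    have h1 := hall m hmmem
    have h2 := hall M hMmem
    exact ⟨by omega, by omega⟩
  · rintro ⟨h1, h2⟩ v hv
    have hv1 := hmin v hv
    have hv2 := hmax v hv
    omega

-- A's inner loop of list_and_list_of_pairs equals B's per-pair extension on a sorted input
theorem pvStepEq (pair : List Int) (hp : pair ≠ []) (t : Int) (si : List Int)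
    (h : si.Pairwise (· ≤ ·)) :
    pvLlInner pair t si = pvExtend si t pair := by
  simp only [pvExtend]
  rw [pvWindow_eq_filter _ _ _ h, List.filter_filter]
  induction si with
  | nil => simp [pvLlInner]
  | cons n rest ih =>
    rw [List.pairwise_cons] at h
    obtain ⟨hn, hrest⟩ := h
    have hw := pvAllWithin pair hp n t
    by_cases hc : (pair.all (fun v => decide (|n - v| ≤ t)) && !pair.contains n) = true
    · have hc' := hc
      rw [Bool.and_eq_true] at hc'
      obtain ⟨hca, hcc⟩ := hc'
      have hF : (!pair.contains n
          && (decide ((PySem.List.max? pair (fun x => x)).getD 0 - t ≤ n)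
              && decide (n ≤ (PySem.List.min? pair (fun x => x)).getD 0 + t))) = true := by
        rw [← hw, hcc, hca]; rfl
      simp only [pvLlInner, if_pos hc, List.filter_cons, hF]
      rw [if_pos trivial, List.map_cons, ih hrest]
    · by_cases hbr : n - (PySem.List.min? pair (fun x => x)).getD 0 > t
      · have hd2 : decide (n ≤ (PySem.List.min? pair (fun x => x)).getD 0 + t) = false := by
          simp; omega
        have hnil : rest.filter
            (fun a => !pair.contains a
              && (decide ((PySem.List.max? pair (fun x => x)).getD 0 - t ≤ a)
                  && decide (a ≤ (PySem.List.min? pair (fun x => x)).getD 0 + t))) = [] := by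
          rw [List.filter_eq_nil_iff]
          intro a ha
          have hna := hn a ha
          simp only [Bool.and_eq_true, decide_eq_true_eq, not_and]
          intro _ _ hC
          omega
        simp only [pvLlInner, if_neg hc, if_pos hbr, List.filter_cons, hd2, Bool.and_false,
          Bool.false_eq_true, if_false, hnil, List.map_nil]
      · have hfn : (!pair.contains n
            && (decide ((PySem.List.max? pair (fun x => x)).getD 0 - t ≤ n)
                && decide (n ≤ (PySem.List.min? pair (fun x => x)).getD 0 + t))) = false := by
          by_cases hco : pair.contains n = true
          · rw [hco]; rfl
          · have hco' : pair.contains n = false := by simpa using hco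
            have hall : pair.all (fun v => decide (|n - v| ≤ t)) = false := by
              by_cases ha : pair.all (fun v => decide (|n - v| ≤ t)) = true
              · exact absurd (by rw [ha, hco']; rfl : _) hc
              · simpa using ha
            rw [hw] at hall
            rw [hco', hall]; rfl
        simp only [pvLlInner, if_neg hc, if_neg hbr, List.filter_cons, hfn, Bool.false_eq_true,
          if_false]
        exact ih hrest

-- every pair produced by B's extension step is nonempty
theorem pvExtend_ne_nil (nums : List Int) (t : Int) (p q : List Int)
    (hq : q ∈ pvExtend nums t p) : q ≠ [] := by
  simp only [pvExtend, List.mem_map] at hq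
  obtain ⟨n, _, rfl⟩ := hq
  simp

-- A's merge fold equals B's merge fold, given every running pair is nonempty
theorem pvFoldEq (rest : List (List Int)) (t : Int) (pairs : List (List Int))
    (hinv : ∀ p ∈ pairs, p ≠ []) :
    rest.foldl (fun rp thing => pvListAndListOfPairs thing rp t) pairs
      = (rest.map (fun l => PySem.List.sorted l (fun x => x))).foldl
          (fun ps nums => ps.flatMap (pvExtend nums t)) pairs := by
  induction rest generalizing pairs with
  | nil => simp
  | cons thing rs ih =>
    have hstep : pvListAndListOfPairs thing pairs t
        = pairs.flatMap (pvExtend (PySem.List.sorted thing (fun x => x)) t) := by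
      unfold pvListAndListOfPairs
      rcases pairs with _ | ⟨p0, ps⟩
      · simp
      · simp only [List.length_cons, if_neg (by omega : ¬ ps.length + 1 = 0)]
        rw [PySem.List.foldl_append_eq_flatMap, List.nil_append]
        apply List.flatMap_congr
        intro p hpmem
        exact pvStepEq p (hinv p hpmem) t _ (PySem.List.sorted_pairwise thing (fun x => x))
    simp only [List.map_cons, List.foldl_cons, hstep]
    apply ih
    intro q hq
    rcases List.mem_flatMap.mp hq with ⟨p, _, hq2⟩
    exact pvExtend_ne_nil _ _ _ _ hq2

-- A's current_list construction copies the input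
theorem pvCopyEq (lol : List (List Int)) :
    lol.foldl (fun cl item => cl ++ [item.foldl (fun wl thing => wl ++ [thing]) []]) []
      = lol := by
  rw [PySem.List.foldl_append_singleton_eq_map, List.nil_append]
  conv_rhs => rw [← List.map_id lol]
  apply List.map_congr_left
  intro item _
  rw [PySem.List.foldl_append_singleton_eq_self, List.nil_append, id]

-- the two ports agree on every input
theorem main_eq : ∀ (lol : List (List Int)) (t : Int),
    pairs_shared_between_all_lists lol t = pairs_shared_between_all_lists_alt lol t := by
  intro lol t
  match lol with
  | [] => rfl
  | [l] =>
    simp [pairs_shared_between_all_lists, pairs_shared_between_all_lists_alt]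
  | l0 :: l1 :: rest =>
    unfold pairs_shared_between_all_lists pairs_shared_between_all_lists_alt
    simp only [List.length_cons, if_neg (by omega : ¬ rest.length + 1 + 1 = 0),
      if_neg (by omega : ¬ rest.length + 1 + 1 = 1)]
    rw [pvCopyEq]
    simp only [List.nil_append]
    have hfirst : pvFindPairsTwoLists l0 l1 t
        = (PySem.List.sorted l0 (fun x => x)).flatMap (fun a =>
            (pvWindow (PySem.List.sorted l1 (fun x => x)) (a - t) (a + t)).map
              (fun b => [a, b])) := by
      unfold pvFindPairsTwoLists
      rw [PySem.List.foldl_append_eq_flatMap, List.nil_append]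
      apply List.flatMap_congr
      intro a _
      rw [pvFpInner_eq a t _ (PySem.List.sorted_pairwise l1 (fun x => x)),
        pvWindow_eq_filter _ _ _ (PySem.List.sorted_pairwise l1 (fun x => x))]
    rw [hfirst]
    apply pvFoldEq
    intro p hp
    rcases List.mem_flatMap.mp hp with ⟨a, _, hp2⟩
    rcases List.mem_map.mp hp2 with ⟨b, _, rfl⟩
    simp

-- ===== VERDICT (by name: the statement is the Claim_ definition above) =====
theorem pairs_shared_between_all_lists_spec : Claim_equal_pairs_shared_between_all_lists := by
  intro list_of_lists threshold _
  exact main_eq list_of_lists threshold
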